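-- pv_equiv track=rewrite | github.com/DiwasKunwar1/postgre_crud | api/price/price_comp.py | get_price
-- ===== SOURCE A (Python) =====
-- def get_price(price_of_product):
--     temp = ''
--     found = False
--     for c in price_of_product:
--         try:
--             int(c)
--             temp += c
--             found = True
--         except:
--             if c != ',' and found:
--                 break
--     return temp
-- ===== SOURCE B (Python) =====
-- import re
--
-- def get_price(price_of_product):
--     m = re.search(r'[0-9][0-9,]*', price_of_product)
--     return m.group().replace(',', '') if m else ''
-- ===== Notes on version B (the rewrite author's own statement) =====
-- stated objective: idiomatic
-- what changed: Replaced the manual accumulate-and-break character loop with a found flag by a single regex search for the first digit run (digits and commas) followed by comma removal.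
import Mathlib
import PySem

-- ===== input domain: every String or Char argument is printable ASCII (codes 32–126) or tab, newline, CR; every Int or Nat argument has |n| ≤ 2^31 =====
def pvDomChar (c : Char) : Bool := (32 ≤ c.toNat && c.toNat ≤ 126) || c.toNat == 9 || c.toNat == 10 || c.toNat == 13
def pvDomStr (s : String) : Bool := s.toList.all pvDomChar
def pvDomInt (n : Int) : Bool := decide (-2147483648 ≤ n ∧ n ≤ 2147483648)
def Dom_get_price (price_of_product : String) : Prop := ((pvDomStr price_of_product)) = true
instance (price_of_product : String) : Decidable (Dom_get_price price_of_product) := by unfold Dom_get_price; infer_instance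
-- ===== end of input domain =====

-- B replaces A's accumulate-and-break loop with declarative regex-style matching
-- (drop to first digit, take digits/commas, strip commas); same cost, no speed claim.

-- ===== PORT A =====
-- loop with early break; `int(c)` succeeds on the ASCII domain exactly for '0'..'9'
-- temp is kept as a List Char (the string under construction) and converted at the end
def getPriceLoop : List Char → List Char → Bool → List Char
  | [], temp, _ => temp
  | c :: rest, temp, found =>
    if '0' ≤ c ∧ c ≤ '9' then getPriceLoop rest (temp ++ [c]) true
    else if c ≠ ',' ∧ found then temp
    else getPriceLoop rest temp found

def get_price (price_of_product : String) : String :=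
  String.ofList (getPriceLoop price_of_product.toList [] false)

-- ===== PORT B =====
-- Source B: m = re.search(r'[0-9][0-9,]*', s); return m.group().replace(',', '') if m else ''
-- The regex is ported by hand (exact): dropWhile to the first digit anchors the match,
-- takeWhile over digits/commas is the greedy extension, filter removes the commas.
def pvIsDigit (c : Char) : Bool := decide ('0' ≤ c ∧ c ≤ '9')

def get_price_alt (price_of_product : String) : String :=
  let m := price_of_product.toList.dropWhile (fun c => !pvIsDigit c)
  if m.isEmpty then ""
  else String.ofList ((m.takeWhile (fun c => pvIsDigit c || c == ',')).filter (fun c => c ≠ ','))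

-- ===== PRECONDITION & SPEC =====
def Spec_get_price (price_of_product : String) (out : String) : Prop := out = get_price_alt price_of_product
instance (price_of_product : String) (out : String) : Decidable (Spec_get_price price_of_product out) := by unfold Spec_get_price; infer_instance

-- ===== CLAIM (what is proved, stated in full; the proofs are below) =====
def Claim_equal_get_price : Prop := ∀ (price_of_product : String), Dom_get_price price_of_product → Spec_get_price price_of_product (get_price price_of_product)

-- ===== LEMMAS AND PROOFS =====

-- once `found = true`, the loop appends digits, skips commas, stops at anything else
theorem getPriceLoop_found (cs : List Char) : ∀ (temp : List Char),
    getPriceLoop cs temp true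
      = temp ++ (cs.takeWhile (fun c => pvIsDigit c || c == ',')).filter (fun c => c ≠ ',') := by
  induction cs with
  | nil => intro temp; simp [getPriceLoop]
  | cons c rest ih =>
    intro temp
    by_cases hd : '0' ≤ c ∧ c ≤ '9'
    · simp [getPriceLoop, hd, ih, pvIsDigit, List.takeWhile,  -- digit case
        show c ≠ ',' by rintro rfl; revert hd; decide]
    · by_cases hc : c = ','
      · subst hc
        simp [getPriceLoop, ih, pvIsDigit, List.takeWhile]
      · have hb : (c == ',') = false := by simp [hc]
        simp [getPriceLoop, hd, hc, hb, List.takeWhile, pvIsDigit]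

-- before the first digit, non-digits (commas included) are skipped
theorem getPriceLoop_notfound (cs : List Char) : ∀ (temp : List Char),
    getPriceLoop cs temp false
      = temp ++ ((cs.dropWhile (fun c => !pvIsDigit c)).takeWhile
          (fun c => pvIsDigit c || c == ',')).filter (fun c => c ≠ ',') := by
  induction cs with
  | nil => intro temp; simp [getPriceLoop]
  | cons c rest ih =>
    intro temp
    by_cases hd : '0' ≤ c ∧ c ≤ '9'
    · simp [getPriceLoop, hd, getPriceLoop_found, List.dropWhile, pvIsDigit,
        show c ≠ ',' by rintro rfl; revert hd; decide]
    · simp [getPriceLoop, hd, ih, List.dropWhile, pvIsDigit]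

-- ===== VERDICT (by name: the statement is the Claim_ definition above) =====
theorem get_price_spec : Claim_equal_get_price := by
  intro s _
  unfold Spec_get_price get_price get_price_alt
  rw [getPriceLoop_notfound]
  by_cases h : (s.toList.dropWhile (fun c => !pvIsDigit c)).isEmpty
  · rw [if_pos h]
    rw [List.isEmpty_iff] at h
    simp [h]
  · rw [if_neg h]
    simp
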